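-- pv_equiv track=rewrite | github.com/eunna-lim/algorithm_study | eunna/level3/12987.py | solution
-- ===== SOURCE A (Python) =====
-- def solution(A, B):
--     answer = 0
--
--     A.sort()
--     B.sort()
--
--     for b in B:
--         a = A[0]
--         if b > a:
--             A.pop(0)
--             answer += 1
--         else:
--             A.pop()
--
--     return answer
-- ===== SOURCE B (Python) =====
-- def solution(A, B):
--     sa = sorted(A)
--     i = 0
--     for b in sorted(B):
--         if i < len(sa) and b > sa[i]:
--             i += 1
--     return i
-- ===== Notes on version B (the rewrite author's own statement) =====
-- stated objective: faster
-- what changed: Replaces the destructive loop that pops from the front (O(n) per pop) or back of the sorted list with a single two-pointer scan over the sorted arrays, observing that back-pops never change A[0].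
import Mathlib
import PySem

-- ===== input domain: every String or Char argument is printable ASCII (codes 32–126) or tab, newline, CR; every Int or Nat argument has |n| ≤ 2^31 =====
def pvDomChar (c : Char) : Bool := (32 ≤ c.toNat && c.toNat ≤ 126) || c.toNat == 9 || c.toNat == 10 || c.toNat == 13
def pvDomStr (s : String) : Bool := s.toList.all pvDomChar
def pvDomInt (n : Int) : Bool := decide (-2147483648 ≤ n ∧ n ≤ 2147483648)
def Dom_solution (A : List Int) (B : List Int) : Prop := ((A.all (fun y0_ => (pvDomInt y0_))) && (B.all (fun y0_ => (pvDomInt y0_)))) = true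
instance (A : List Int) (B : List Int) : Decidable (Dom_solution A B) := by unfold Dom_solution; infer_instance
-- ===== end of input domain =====

-- B replaces A's destructive pop(0)/pop() loop by a two-pointer scan over the sorted lists (faster);
-- A sorts its arguments in place (a side effect B does not have) — the equivalence is about the return value only.

-- ===== PORT A =====
-- the for-loop over sorted B; state: the mutable list A and the accumulator answer
def solutionLoop : List Int → List Int → Int → Int
  | _, [], ans => ans
  | [], _ :: _, ans => ans        -- Python raises IndexError (A[0] on empty A) here; excluded by Pre_solution
  | a :: rest, b :: bs, ans =>
      if b > a then solutionLoop rest bs (ans + 1)          -- A.pop(0); answer += 1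
      else solutionLoop ((a :: rest).dropLast) bs ans       -- A.pop()

def solution (A : List Int) (B : List Int) : Int :=
  solutionLoop (PySem.List.sorted A (fun x => x) false) (PySem.List.sorted B (fun x => x) false) 0

-- ===== PORT B =====
-- one step of the two-pointer scan: if i < len(sa) and b > sa[i]: i += 1
def altStep (sa : List Int) (i : Int) (b : Int) : Int :=
  if i < (sa.length : Int) then
    match PySem.List.pyGet? sa i with
    | some a => if b > a then i + 1 else i
    | none => i
  else i

def solution_alt (A : List Int) (B : List Int) : Int :=
  (PySem.List.sorted B (fun x => x) false).foldl (altStep (PySem.List.sorted A (fun x => x) false)) 0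

-- ===== PRECONDITION & SPEC =====
-- A raises IndexError when len(B) > len(A); exactly those inputs are excluded.
def Pre_solution (A : List Int) (B : List Int) : Prop := B.length ≤ A.length
instance (A : List Int) (B : List Int) : Decidable (Pre_solution A B) := by unfold Pre_solution; infer_instance
def pvWitness_solution : List Int × List Int := ([3, 1, 2], [2, 4])

def Spec_solution (A : List Int) (B : List Int) (out : Int) : Prop := out = solution_alt A B
instance (A : List Int) (B : List Int) (out : Int) : Decidable (Spec_solution A B out) := by unfold Spec_solution; infer_instance

-- ===== CLAIM (what is proved, stated in full; the proofs are below) =====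
def Claim_equal_solution : Prop := ∀ (A : List Int) (B : List Int), Dom_solution A B → Pre_solution A B → Spec_solution A B (solution A B)

-- ===== LEMMAS AND PROOFS =====

lemma altStep_at (sa : List Int) (i : ℕ) (b : Int) (h : i < sa.length) :
    altStep sa (i : Int) b = if b > sa[i] then ((i : Int) + 1) else (i : Int) := by
  simp [altStep, h]

-- the key invariant: A's loop on the slice sa[i : len-k] equals ans plus the advance of B's pointer
lemma loop_eq (sa : List Int) : ∀ (bs : List Int) (i k : ℕ) (ans : Int),
    bs.length + i + k ≤ sa.length →
    solutionLoop ((sa.drop i).take (sa.length - i - k)) bs ans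
      = ans + (bs.foldl (altStep sa) (i : Int) - i) := by
  intro bs
  induction bs with
  | nil =>
      intro i k ans _
      cases h : (sa.drop i).take (sa.length - i - k) <;> simp [solutionLoop]
  | cons b bs ih =>
      intro i k ans hlen
      simp only [List.length_cons] at hlen
      have hi : i < sa.length := by omega
      obtain ⟨n, hn⟩ : ∃ n, sa.length - i - k = n + 1 := ⟨sa.length - i - k - 1, by omega⟩
      have hdrop : sa.drop i = sa[i] :: sa.drop (i + 1) := List.drop_eq_getElem_cons hi
      have hseg : (sa.drop i).take (sa.length - i - k)
          = sa[i] :: (sa.drop (i + 1)).take n := by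
        rw [hn, hdrop, List.take_succ_cons]
      rw [hseg]
      have hstep := altStep_at sa i b hi
      by_cases hb : b > sa[i]
      · -- front pop, answer += 1; pointer advances
        simp only [solutionLoop, if_pos hb]
        have h1 : (sa.drop (i + 1)).take (sa.length - (i + 1) - k)
            = (sa.drop (i + 1)).take n := by
          congr 1; omega
        have hih := ih (i + 1) k (ans + 1) (by omega)
        rw [h1] at hih
        rw [hih]
        simp only [List.foldl_cons, hstep, if_pos hb]
        push_cast
        ring
      · -- back pop; pointer stays
        simp only [solutionLoop, if_neg hb]
        have hlen' : (sa[i] :: (sa.drop (i + 1)).take n).dropLast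
            = (sa.drop i).take (sa.length - i - (k + 1)) := by
          rw [← hseg, List.dropLast_eq_take, List.take_take]
          have hlenseg : ((sa.drop i).take (sa.length - i - k)).length = sa.length - i - k := by
            rw [List.length_take, List.length_drop]
            omega
          rw [hlenseg]
          congr 1
          omega
        rw [hlen']
        have hih := ih i (k + 1) ans (by omega)
        rw [hih]
        simp only [List.foldl_cons, hstep, if_neg hb]

-- ===== VERDICT (by name: the statement is the Claim_ definition above) =====
theorem solution_spec : Claim_equal_solution := by
  intro A B _ hpre
  unfold Spec_solution solution solution_alt
  have hlenA : (PySem.List.sorted A (fun x => x) false).length = A.length :=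
    PySem.List.length_sorted ..
  have hlenB : (PySem.List.sorted B (fun x => x) false).length = B.length :=
    PySem.List.length_sorted ..
  have h := loop_eq (PySem.List.sorted A (fun x => x) false)
      (PySem.List.sorted B (fun x => x) false) 0 0 0
      (by rw [hlenA, hlenB]; simpa using hpre)
  have e : ((PySem.List.sorted A (fun x => x) false).drop 0).take
      ((PySem.List.sorted A (fun x => x) false).length - 0 - 0)
      = PySem.List.sorted A (fun x => x) false := by
    simp
  rw [e] at h
  simpa using h
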